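-- pv_equiv track=rewrite | github.com/DanielJohn17/leetcode_problems | 2099-find-subsequence-of-length-k-with-the-largest-sum/2099-find-subsequence-of-length-k-with-the-largest-sum.py | maxSubsequence
-- ===== SOURCE A (Python) =====
-- from typing import List
--
-- def maxSubsequence(nums: List[int], k: int) -> List[int]:
--     tmp_nums = sorted(nums)[len(nums) - k:len(nums)]
--     max_sum = []
--
--     for num in nums:
--         if num in tmp_nums and len(max_sum) < k:
--             tmp_nums.remove(num)
--             max_sum.append(num)
--
--     return max_sum
-- ===== SOURCE B (Python) =====
-- def maxSubsequence(nums, k):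
--     n = len(nums)
--     kk = min(k, n)
--     if kk <= 0:
--         return []
--     t = sorted(nums)[n - kk]          # kth-largest threshold
--     quota = kk - sum(1 for x in nums if x > t)   # copies of t still needed
--     out = []
--     for num in nums:
--         if num > t or (num == t and quota > 0):
--             out.append(num)
--             if num == t:
--                 quota -= 1
--     return out
-- ===== Notes on version B (the rewrite author's own statement) =====
-- stated objective: alternative
-- what changed: B computes the kth-largest threshold from one sort and emits the answer in a single order-preserving pass with a tie quota, instead of A's per-element membership test and remove() on the sorted top-k list.
-- intended difference: For n < k < 2n (negative-index wraparound in sorted(nums)[n-k:n]) A returns only the top k-n elements in order, while B returns the whole list, the intended length-min(k,n) largest-sum subsequence. — e.g. on maxSubsequence([1, 2], 3): A returns [2], B returns [1, 2]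
import Mathlib
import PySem

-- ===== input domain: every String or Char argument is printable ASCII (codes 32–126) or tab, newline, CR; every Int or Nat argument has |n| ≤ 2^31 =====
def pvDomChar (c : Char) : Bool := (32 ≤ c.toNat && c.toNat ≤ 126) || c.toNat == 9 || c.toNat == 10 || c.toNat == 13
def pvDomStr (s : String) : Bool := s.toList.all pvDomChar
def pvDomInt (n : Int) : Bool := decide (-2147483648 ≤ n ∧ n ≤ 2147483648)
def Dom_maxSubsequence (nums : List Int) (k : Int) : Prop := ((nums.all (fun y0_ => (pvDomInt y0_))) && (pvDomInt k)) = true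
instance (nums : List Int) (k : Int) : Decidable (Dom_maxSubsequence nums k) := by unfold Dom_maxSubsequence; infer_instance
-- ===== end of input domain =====

-- B replaces A's per-element membership/remove scan of the top-k list by a single
-- order-preserving pass against the kth-largest threshold with a tie quota (objective: alternative).

-- ===== PORT A =====
def maxSubsequence (nums : List Int) (k : Int) : List Int :=
  let tmp_nums := PySem.List.slice (PySem.List.sorted nums (fun x => x) false)
      (some ((nums.length : Int) - k)) (some (nums.length : Int))
  -- tmp_nums.remove(num) is guarded by 'num in tmp_nums', where list.remove = List.erase
  -- exactly (PySem.List.remove?_eq_some_erase)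
  let st := nums.foldl (fun (st : List Int × List Int) num =>
      if num ∈ st.1 ∧ (st.2.length : Int) < k then
        (st.1.erase num, st.2 ++ [num])
      else st) (tmp_nums, [])
  st.2

-- ===== PORT B =====
def maxSubsequence_alt (nums : List Int) (k : Int) : List Int :=
  let n : Int := nums.length
  let kk := min k n
  if kk ≤ 0 then []
  else
    match PySem.List.pyGet? (PySem.List.sorted nums (fun x => x) false) (n - kk) with
    | none => []   -- unreachable totalisation guard: 1 ≤ kk ≤ n puts the index in range
    | some t =>
      let quota := kk - ((nums.filter (fun x => decide (t < x))).length : Int)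
      (nums.foldl (fun (st : List Int × Int) num =>
          if t < num ∨ (num = t ∧ 0 < st.2) then
            (st.1 ++ [num], if num = t then st.2 - 1 else st.2)
          else st) ([], quota)).1

-- ===== PRECONDITION & SPEC =====
-- For n < k < 2n (negative-index wraparound in sorted(nums)[n-k:n]) A returns only the
-- top k-n elements in order, while B returns the whole list, the intended
-- length-min(k,n) largest-sum subsequence.
def D_maxSubsequence (nums : List Int) (k : Int) : Prop :=
  (nums.length : Int) < k ∧ k < 2 * (nums.length : Int)
instance (nums : List Int) (k : Int) : Decidable (D_maxSubsequence nums k) := by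
  unfold D_maxSubsequence; infer_instance

def Spec_maxSubsequence (nums : List Int) (k : Int) (out : List Int) : Prop :=
  ¬ D_maxSubsequence nums k → out = maxSubsequence_alt nums k
instance (nums : List Int) (k : Int) (out : List Int) : Decidable (Spec_maxSubsequence nums k out) := by
  unfold Spec_maxSubsequence; infer_instance

def pvDiffWitness_maxSubsequence : List Int × Int := ([1, 2], 3)
def pvDiffWitnessOut_maxSubsequence : (List Int) × (List Int) := ([2], [1, 2])

-- ===== CLAIM (what is proved, stated in full; the proofs are below) =====
def Claim_unchanged_maxSubsequence : Prop := ∀ (nums : List Int) (k : Int),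
  Dom_maxSubsequence nums k → Spec_maxSubsequence nums k (maxSubsequence nums k)
def Claim_changed_maxSubsequence : Prop :=
  Dom_maxSubsequence (pvDiffWitness_maxSubsequence.1) (pvDiffWitness_maxSubsequence.2) ∧
  D_maxSubsequence (pvDiffWitness_maxSubsequence.1) (pvDiffWitness_maxSubsequence.2) ∧
  maxSubsequence (pvDiffWitness_maxSubsequence.1) (pvDiffWitness_maxSubsequence.2) = pvDiffWitnessOut_maxSubsequence.1 ∧
  maxSubsequence_alt (pvDiffWitness_maxSubsequence.1) (pvDiffWitness_maxSubsequence.2) = pvDiffWitnessOut_maxSubsequence.2 ∧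
  pvDiffWitnessOut_maxSubsequence.1 ≠ pvDiffWitnessOut_maxSubsequence.2
def Claim_exact_maxSubsequence : Prop := ∀ (nums : List Int) (k : Int),
  Dom_maxSubsequence nums k → D_maxSubsequence nums k →
  maxSubsequence nums k ≠ maxSubsequence_alt nums k

-- ===== LEMMAS AND PROOFS =====

-- slice xs[a:len(xs)] is a clamped drop
lemma slice_to_len (s : List Int) (a : Int) :
    PySem.List.slice s (some a) (some (s.length : Int)) = s.drop (PySem.List.clampIdx s.length a) := by
  unfold PySem.List.slice
  have hb : PySem.List.clampIdx s.length (s.length : Int) = s.length := by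
    simp [PySem.List.clampIdx_natCast s.length s.length]
  show List.take (PySem.List.clampIdx s.length (s.length : Int) - PySem.List.clampIdx s.length a)
      (List.drop (PySem.List.clampIdx s.length a) s) = _
  rw [hb]
  exact List.take_of_length_le (by simp)

-- A's loop with an empty pool never emits anything.
lemma loopA_nil_tmp (k : Int) (l : List Int) (out : List Int) :
    l.foldl (fun (st : List Int × List Int) num =>
      if num ∈ st.1 ∧ (st.2.length : Int) < k then
        (st.1.erase num, st.2 ++ [num])
      else st) ([], out) = ([], out) := by
  induction l generalizing out with
  | nil => rfl
  | cons x l ih => simpa using ih out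

-- A's loop can emit at most as many elements as the pool holds.
lemma loopA_length (k : Int) (l : List Int) :
    ∀ (tmp out : List Int),
      ((l.foldl (fun (st : List Int × List Int) num =>
        if num ∈ st.1 ∧ (st.2.length : Int) < k then
          (st.1.erase num, st.2 ++ [num])
        else st) (tmp, out)).2).length ≤ out.length + tmp.length := by
  induction l with
  | nil => intro tmp out; simp
  | cons x l ih =>
    intro tmp out
    by_cases h : x ∈ tmp ∧ (out.length : Int) < k
    · simp only [List.foldl_cons, if_pos h]
      refine (ih _ _).trans ?_
      have hlen := List.length_erase_of_mem h.1
      have hpos := List.length_pos_of_mem h.1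
      simp only [List.length_append, List.length_cons, List.length_nil]
      omega
    · simpa [h] using ih tmp out

-- elements at least t split into copies of t and elements above t
lemma count_add_countP (t : Int) (l : List Int) (h : ∀ x ∈ l, t ≤ x) :
    l.count t + l.countP (fun x => decide (t < x)) = l.length := by
  induction l with
  | nil => simp
  | cons x l ih =>
    have hx := h x (by simp)
    have hl := ih (fun y hy => h y (List.mem_cons_of_mem _ hy))
    by_cases hxt : x = t
    · subst hxt; simp; omega
    · have hlt : t < x := lt_of_le_of_ne hx (Ne.symm hxt)
      simp [hxt, hlt]
      omega

-- The core loop equivalence: A's membership/remove loop and B's threshold/quota loop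
-- produce the same output under the counting invariant on the pool.
lemma loop_eq (k t : Int) (K : Nat) (hKk : (K : Int) ≤ k) :
    ∀ (l tmp out : List Int) (q : Int),
      (∀ v, t < v → tmp.count v = l.count v) →
      ((tmp.count t : Int) = q) →
      (∀ v, v < t → tmp.count v = 0) →
      out.length + tmp.length = K →
      (l.foldl (fun (st : List Int × List Int) num =>
          if num ∈ st.1 ∧ (st.2.length : Int) < k then
            (st.1.erase num, st.2 ++ [num])
          else st) (tmp, out)).2
      = (l.foldl (fun (st : List Int × Int) num =>
          if t < num ∨ (num = t ∧ 0 < st.2) then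
            (st.1 ++ [num], if num = t then st.2 - 1 else st.2)
          else st) (out, q)).1 := by
  intro l
  induction l with
  | nil => intro tmp out q _ _ _ _; rfl
  | cons x l ih =>
    intro tmp out q h1 h2 h3 hlen
    simp only [List.foldl_cons]
    rcases lt_trichotomy t x with hx | hx | hx
    · -- x above the threshold: both sides emit x
      have hc : tmp.count x = (x :: l).count x := h1 x hx
      have hmem : x ∈ tmp := List.count_pos_iff.mp (by simp [List.count_cons_self] at hc; omega)
      have hpos := List.length_pos_of_mem hmem
      have hguard : (out.length : Int) < k := by omega
      have hxt : ¬ (x = t) := by omega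
      rw [if_pos ⟨hmem, hguard⟩, if_pos (Or.inl hx), if_neg hxt]
      apply ih
      · intro v hv
        by_cases hvx : v = x
        · subst hvx
          rw [List.count_erase_self]
          simp [List.count_cons_self] at hc ⊢
          omega
        · rw [List.count_erase_of_ne hvx, h1 v hv, List.count_cons_of_ne (Ne.symm hvx)]
      · rw [List.count_erase_of_ne (by omega : t ≠ x)]; exact h2
      · intro v hv
        rw [List.count_erase_of_ne (by omega : v ≠ x)]; exact h3 v hv
      · have := List.length_erase_of_mem hmem
        simp only [List.length_append, List.length_cons, List.length_nil]
        omega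
    · -- x equals the threshold: both sides test the remaining quota
      subst hx
      by_cases hq : 0 < q
      · have hcpos : 0 < tmp.count t := by omega
        have hmem : t ∈ tmp := List.count_pos_iff.mp hcpos
        have hpos := List.length_pos_of_mem hmem
        have hguard : (out.length : Int) < k := by omega
        rw [if_pos ⟨hmem, hguard⟩, if_pos (Or.inr ⟨rfl, hq⟩), if_pos rfl]
        apply ih
        · intro v hv
          rw [List.count_erase_of_ne (by omega : v ≠ t), h1 v hv,
            List.count_cons_of_ne (by omega : t ≠ v)]
        · rw [List.count_erase_self]; omega
        · intro v hv
          rw [List.count_erase_of_ne (by omega : v ≠ t)]; exact h3 v hv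
        · have := List.length_erase_of_mem hmem
          simp only [List.length_append, List.length_cons, List.length_nil]
          omega
      · have hc0 : tmp.count t = 0 := by omega
        have hnmem : t ∉ tmp := List.count_eq_zero.mp hc0
        rw [if_neg (fun h => hnmem h.1), if_neg (by simp; omega)]
        apply ih _ _ _ _ h2 h3 hlen
        intro v hv
        rw [h1 v hv, List.count_cons_of_ne (by omega : t ≠ v)]
    · -- x below the threshold: both sides skip it
      have hc0 : tmp.count x = 0 := h3 x hx
      have hnmem : x ∉ tmp := List.count_eq_zero.mp hc0
      rw [if_neg (fun h => hnmem h.1), if_neg (by simp; omega)]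
      apply ih _ _ _ _ h2 h3 hlen
      intro v hv
      rw [h1 v hv, List.count_cons_of_ne (by omega : x ≠ v)]

-- B returns the input list unchanged when t is a lower bound and the quota covers all its copies.
lemma loopB_all (t : Int) :
    ∀ (l out : List Int) (q : Int), (∀ x ∈ l, t ≤ x) → q = (l.count t : Int) →
      (l.foldl (fun (st : List Int × Int) num =>
          if t < num ∨ (num = t ∧ 0 < st.2) then
            (st.1 ++ [num], if num = t then st.2 - 1 else st.2)
          else st) (out, q)).1 = out ++ l := by
  intro l
  induction l with
  | nil => intro out q _ _; simp
  | cons x l ih =>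
    intro out q h hq
    have hx := h x (by simp)
    simp only [List.foldl_cons]
    by_cases hxt : x = t
    · subst hxt
      have hqpos : 0 < q := by simp [List.count_cons_self] at hq; omega
      rw [if_pos (Or.inr ⟨rfl, hqpos⟩), if_pos rfl,
        ih _ _ (fun y hy => h y (List.mem_cons_of_mem _ hy))
          (by simp [List.count_cons_self] at hq ⊢; omega)]
      simp
    · have hlt : t < x := lt_of_le_of_ne hx (Ne.symm hxt)
      rw [if_pos (Or.inl hlt), if_neg hxt,
        ih _ _ (fun y hy => h y (List.mem_cons_of_mem _ hy))
          (by rw [hq, List.count_cons_of_ne hxt])]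
      simp

-- Facts about the top-K suffix of the sorted list: its threshold t = sorted[n-K],
-- the counts of values above / at / below t, and its length.
lemma sorted_suffix_facts (nums : List Int) (K : Nat) (hK1 : 1 ≤ K) (hKn : K ≤ nums.length) :
    ∃ t, PySem.List.pyGet? (PySem.List.sorted nums (fun x => x) false) ((nums.length - K : Nat) : Int) = some t ∧
      (∀ v, t < v → ((PySem.List.sorted nums (fun x => x) false).drop (nums.length - K)).count v = nums.count v) ∧
      ((((PySem.List.sorted nums (fun x => x) false).drop (nums.length - K)).count t : Int)
        = (K : Int) - ((nums.filter (fun x => decide (t < x))).length : Int)) ∧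
      (∀ v, v < t → ((PySem.List.sorted nums (fun x => x) false).drop (nums.length - K)).count v = 0) ∧
      ((PySem.List.sorted nums (fun x => x) false).drop (nums.length - K)).length = K ∧
      (∀ y ∈ (PySem.List.sorted nums (fun x => x) false).drop (nums.length - K), t ≤ y) := by
  set s := PySem.List.sorted nums (fun x => x) false with hs
  have hsl : s.length = nums.length := PySem.List.length_sorted nums (fun x => x) false
  have hperm : s.Perm nums := PySem.List.sorted_perm nums (fun x => x) false
  have hidx : nums.length - K < s.length := by omega
  have hp : s.Pairwise (fun a b => a ≤ b) := PySem.List.sorted_pairwise nums (fun x => x)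
  set t := s[nums.length - K] with ht
  refine ⟨t, by rw [PySem.List.pyGet?_natCast, List.getElem?_eq_getElem hidx], ?_⟩
  have hdcons : s.drop (nums.length - K) = t :: s.drop (nums.length - K + 1) :=
    List.drop_eq_getElem_cons hidx
  have htmem : t ∈ s.drop (nums.length - K) := by rw [hdcons]; exact List.mem_cons_self
  have hcross : ∀ x ∈ s.take (nums.length - K), ∀ y ∈ s.drop (nums.length - K), x ≤ y := by
    have := hp
    rw [← List.take_append_drop (nums.length - K) s, List.pairwise_append] at this
    exact this.2.2
  have hge : ∀ y ∈ s.drop (nums.length - K), t ≤ y := by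
    intro y hy
    have hpd : (s.drop (nums.length - K)).Pairwise (fun a b => a ≤ b) :=
      hp.sublist (List.drop_sublist _ _)
    rw [hdcons] at hpd hy
    rcases List.mem_cons.mp hy with hy | hy
    · simp [hy]
    · exact (List.pairwise_cons.mp hpd).1 y hy
  have hle : ∀ x ∈ s.take (nums.length - K), x ≤ t := fun x hx => hcross x hx t htmem
  have hcnt : ∀ v : Int, nums.count v = (s.take (nums.length - K)).count v + (s.drop (nums.length - K)).count v := by
    intro v
    rw [← hperm.count_eq]
    conv_lhs => rw [← List.take_append_drop (nums.length - K) s]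
    rw [List.count_append]
  have hdlen : (s.drop (nums.length - K)).length = K := by
    rw [List.length_drop, hsl]; omega
  refine ⟨?_, ?_, ?_, hdlen, hge⟩
  · intro v hv
    have h0 : (s.take (nums.length - K)).count v = 0 :=
      List.count_eq_zero.mpr (fun hm => absurd (hle v hm) (by omega))
    rw [hcnt v, h0]; omega
  · have e1 := count_add_countP t _ hge
    have e2 : (nums.filter (fun x => decide (t < x))).length
        = (s.drop (nums.length - K)).countP (fun x => decide (t < x)) := by
      rw [← List.countP_eq_length_filter, ← hperm.countP_eq]
      conv_lhs => rw [← List.take_append_drop (nums.length - K) s]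
      rw [List.countP_append]
      have h0 : (s.take (nums.length - K)).countP (fun x => decide (t < x)) = 0 := by
        rw [List.countP_eq_zero]
        intro x hx
        simpa using not_lt.mpr (hle x hx)
      omega
    rw [e2]
    rw [hdlen] at e1
    omega
  · intro v hv
    exact List.count_eq_zero.mpr (fun hm => absurd (hge v hm) (by omega))

theorem maxSubsequence_spec : Claim_unchanged_maxSubsequence := by
  intro nums k _hdom hD
  show maxSubsequence nums k = maxSubsequence_alt nums k
  have hsl : (PySem.List.sorted nums (fun x => x) false).length = nums.length :=
    PySem.List.length_sorted nums (fun x => x) false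
  have hslice : ∀ a : Int, PySem.List.slice (PySem.List.sorted nums (fun x => x) false)
      (some a) (some ((nums.length : Nat) : Int))
      = (PySem.List.sorted nums (fun x => x) false).drop (PySem.List.clampIdx nums.length a) := by
    intro a
    have h := slice_to_len (PySem.List.sorted nums (fun x => x) false) a
    rw [hsl] at h
    exact h
  unfold D_maxSubsequence at hD
  push Not at hD
  simp only [maxSubsequence, maxSubsequence_alt]
  by_cases hkk : min k ((nums.length : Nat) : Int) ≤ 0
  · rw [if_pos hkk]
    by_cases hnil : nums = []
    · subst hnil; simp
    · have hn1 : 1 ≤ nums.length := List.length_pos_iff.mpr hnil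
      have hk0 : k ≤ 0 := by omega
      have ha : ((nums.length : Nat) : Int) - k = ((nums.length + (-k).toNat : Nat) : Int) := by
        push_cast; omega
      rw [ha, hslice, PySem.List.clampIdx_natCast,
        (by omega : min (nums.length + (-k).toNat) nums.length = nums.length),
        ← hsl, List.drop_length, loopA_nil_tmp]
  · rw [if_neg hkk]
    push Not at hkk
    set K := (min k ((nums.length : Nat) : Int)).toNat with hK
    have hKint : (K : Int) = min k ((nums.length : Nat) : Int) := Int.toNat_of_nonneg (by omega)
    have hK1 : 1 ≤ K := by omega
    have hKn : K ≤ nums.length := by omega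
    have hKk : (K : Int) ≤ k := by omega
    obtain ⟨t, hget, h1, h2, h3, hdlen, _hge⟩ := sorted_suffix_facts nums K hK1 hKn
    have hidxeq : ((nums.length : Nat) : Int) - min k ((nums.length : Nat) : Int)
        = ((nums.length - K : Nat) : Int) := by push_cast; omega
    rw [hidxeq, hget]
    have hclamp : PySem.List.clampIdx nums.length (((nums.length : Nat) : Int) - k)
        = nums.length - K := by
      by_cases hkn : k ≤ (nums.length : Int)
      · have hb : ((nums.length : Nat) : Int) - k = ((nums.length - K : Nat) : Int) := by
          push_cast; omega
        rw [hb, PySem.List.clampIdx_natCast]; omega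
      · have h2n : 2 * (nums.length : Int) ≤ k := hD (by omega)
        have hb : ((nums.length : Nat) : Int) - k = -(((k - nums.length).toNat : Nat) : Int) := by
          push_cast; omega
        rw [hb, PySem.List.clampIdx_neg_natCast nums.length ((k - (nums.length:Int)).toNat) (by omega)]
        omega
    rw [hslice, hclamp]
    refine loop_eq k t K hKk nums _ [] _ h1 ?_ h3 ?_
    · rw [h2, hKint]
    · simpa using hdlen

theorem maxSubsequence_changed : Claim_changed_maxSubsequence := by
  unfold Claim_changed_maxSubsequence; decide

theorem maxSubsequence_tight : Claim_exact_maxSubsequence := by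
  intro nums k _hdom hDh
  unfold D_maxSubsequence at hDh
  obtain ⟨hd1, hd2⟩ := hDh
  have hn1 : 1 ≤ nums.length := by omega
  have hsl : (PySem.List.sorted nums (fun x => x) false).length = nums.length :=
    PySem.List.length_sorted nums (fun x => x) false
  have hperm : (PySem.List.sorted nums (fun x => x) false).Perm nums :=
    PySem.List.sorted_perm nums (fun x => x) false
  have hBnums : maxSubsequence_alt nums k = nums := by
    simp only [maxSubsequence_alt]
    rw [if_neg (by omega : ¬ min k ((nums.length : Nat) : Int) ≤ 0)]
    obtain ⟨t, hget, _h1, h2, _h3, _hdlen, hge⟩ :=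
      sorted_suffix_facts nums nums.length (by omega) le_rfl
    have hidxeq : ((nums.length : Nat) : Int) - min k ((nums.length : Nat) : Int)
        = ((nums.length - nums.length : Nat) : Int) := by push_cast; omega
    rw [hidxeq, hget]
    rw [Nat.sub_self, List.drop_zero] at h2 hge
    have happ := loopB_all t nums []
      (min k ((nums.length : Nat) : Int) - ((nums.filter (fun x => decide (t < x))).length : Int))
      (fun x hx => hge x (hperm.mem_iff.mpr hx))
      (by rw [← hperm.count_eq t]; omega)
    exact happ.trans (List.nil_append nums)
  have hAlen : (maxSubsequence nums k).length < nums.length := by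
    simp only [maxSubsequence]
    have h := slice_to_len (PySem.List.sorted nums (fun x => x) false)
      (((nums.length : Nat) : Int) - k)
    rw [hsl] at h
    have hb : ((nums.length : Nat) : Int) - k = -(((k - nums.length).toNat : Nat) : Int) := by
      push_cast; omega
    rw [hb, PySem.List.clampIdx_neg_natCast nums.length ((k - (nums.length:Int)).toNat) (by omega)] at h
    rw [hb, h]
    refine lt_of_le_of_lt (loopA_length k nums _ _) ?_
    simp only [List.length_nil, List.length_drop, hsl, Nat.zero_add]
    omega
  intro hcontra
  rw [hcontra, hBnums] at hAlen
  exact lt_irrefl _ hAlen
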